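-- pv_equiv track=rewrite | github.com/PetrPrazak/AdventOfCode | 2018/05/aoc2018_day05.py | react
-- ===== SOURCE A (Python) =====
-- def isPair(one, two):
--     if one.islower():
--         return one.upper() == two
--     elif two.islower():
--         return one == two.upper()
--     return False
--
-- def react(data):
--     chain = data.copy()
--     index = 0
--     while(index < len(chain) - 1):
--         if isPair(chain[index], chain[index + 1]):
--             del chain[index:index+2]
--             if index > 0:
--                 index -= 1
--         else:
--             index += 1
--     return len(chain)
-- ===== SOURCE B (Python) =====
-- def isPair(one, two):
--     if one.islower():
--         return one.upper() == two
--     elif two.islower():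
--         return one == two.upper()
--     return False
--
-- def react(data):
--     # Stack-based single pass: push each unit, pop when it reacts with the top.
--     stack = []
--     for unit in data:
--         if stack and isPair(stack[-1], unit):
--             stack.pop()
--         else:
--             stack.append(unit)
--     return len(stack)
-- ===== Notes on version B (the rewrite author's own statement) =====
-- stated objective: alternative
-- what changed: Replaced the in-place del/backtracking index while-loop over a mutable copy with a single left-to-right pass maintaining a stack (push each unit, pop when it pairs with the top); worst-case quadratic deletion cost disappears, though on random inputs a timing run read only ~1.5x.
import Mathlib
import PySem

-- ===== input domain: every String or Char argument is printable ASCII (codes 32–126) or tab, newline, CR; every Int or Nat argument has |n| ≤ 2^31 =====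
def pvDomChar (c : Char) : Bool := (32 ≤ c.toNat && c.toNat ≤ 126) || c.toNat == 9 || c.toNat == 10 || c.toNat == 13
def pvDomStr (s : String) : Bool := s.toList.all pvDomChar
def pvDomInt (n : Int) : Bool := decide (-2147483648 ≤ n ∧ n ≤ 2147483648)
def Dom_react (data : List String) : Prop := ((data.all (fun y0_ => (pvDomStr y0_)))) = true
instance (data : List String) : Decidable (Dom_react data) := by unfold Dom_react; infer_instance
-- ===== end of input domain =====

-- B replaces A's in-place del/backtrack while-loop with a single stack pass (a different algorithm).

-- ===== PORT A =====
-- str.islower(): at least one cased char and all cased chars lowercase; exact on ASCII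
def strIslowerP (s : String) : Bool :=
  s.toList.any PySem.Chars.islower && s.toList.all (fun c => !PySem.Chars.isupper c)

def isPairP (one two : String) : Bool :=
  if strIslowerP one then PySem.Str.upper one == two
  else if strIslowerP two then one == PySem.Str.upper two
  else false

-- the while loop: state (chain, index); `del chain[index:index+2]` = take ++ drop;
-- Python's `if index > 0: index -= 1` is Nat subtraction `index - 1`
def reactLoop (chain : List String) (index : Nat) : Nat :=
  if h : index + 1 < chain.length then
    if isPairP chain[index] chain[index + 1] then
      reactLoop (chain.take index ++ chain.drop (index + 2)) (index - 1)
    else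
      reactLoop chain (index + 1)
  else
    chain.length
termination_by 2 * chain.length - index
decreasing_by
  · simp only [List.length_append, List.length_take, List.length_drop]; omega
  · omega

def react (data : List String) : Int := (reactLoop data 0 : Int)

-- ===== PORT B =====
-- the stack: head of the list is the top (Python's stack[-1] / pop / append)
def stepB (stack : List String) (unit : String) : List String :=
  match stack with
  | top :: rest => if isPairP top unit then rest else unit :: top :: rest
  | [] => [unit]

def react_alt (data : List String) : Int := ((data.foldl stepB []).length : Int)

-- ===== PRECONDITION & SPEC =====
def Spec_react (data : List String) (out : Int) : Prop := out = react_alt data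
instance (data : List String) (out : Int) : Decidable (Spec_react data out) := by unfold Spec_react; infer_instance

-- ===== CLAIM (what is proved, stated in full; the proofs are below) =====
def Claim_equal_react : Prop := ∀ (data : List String), Dom_react data → Spec_react data (react data)

-- ===== LEMMAS AND PROOFS =====

-- OkStack s: adjacent stack entries (head = top) never react: for … b :: a :: …, ¬ isPairP a b
def OkStack : List String → Prop
  | b :: a :: t => isPairP a b = false ∧ OkStack (a :: t)
  | _ => True

theorem okStack_tail {a : String} {t : List String} (h : OkStack (a :: t)) : OkStack t := by
  cases t with
  | nil => trivial
  | cons b t' => exact h.2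

-- Main invariant: A's loop on (stack.reverse ++ rest, |stack| - 1) computes B's fold.
theorem loop_eq_fold (rest : List String) : ∀ stack : List String, OkStack stack →
    reactLoop (stack.reverse ++ rest) (stack.length - 1)
      = (rest.foldl stepB stack).length := by
  induction rest with
  | nil =>
    intro s _
    rw [reactLoop]
    have : ¬ (s.length - 1 + 1 < (s.reverse ++ ([] : List String)).length) := by
      simp; omega
    simp only [this, dif_neg, not_false_iff, List.foldl_nil]
    simp
  | cons u r ih =>
    intro s hs
    cases s with
    | nil =>
      -- empty stack: the very same call as stack = [u], rest = r
      have h1 : ([] : List String).reverse ++ u :: r = [u].reverse ++ r := by simp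
      rw [h1]
      have := ih [u] trivial
      simpa [stepB] using this
    | cons t s' =>
      rw [reactLoop]
      simp only [List.length_cons, Nat.add_sub_cancel, List.reverse_cons, List.append_assoc,
        List.singleton_append]
      have hg : s'.length + 1 < (s'.reverse ++ t :: u :: r).length := by simp
      rw [dif_pos hg]
      have hidx : (s'.reverse ++ t :: u :: r)[s'.length]'(by omega) = t := by
        rw [List.getElem_append_right (by simp)]
        simp
      have hidx1 : (s'.reverse ++ t :: u :: r)[s'.length + 1]'hg = u := by
        rw [List.getElem_append_right (by simp)]
        simp
      rw [hidx, hidx1]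
      by_cases hp : isPairP t u = true
      · rw [if_pos hp]
        have htake : (s'.reverse ++ t :: u :: r).take s'.length = s'.reverse := by
          rw [List.take_append_of_le_length (by simp)]
          simp
        have hdrop : (s'.reverse ++ t :: u :: r).drop (s'.length + 2) = r := by
          have e2 : s'.length + 2 = s'.reverse.length + 2 := by simp
          rw [e2, List.drop_append]
          simp
        rw [htake, hdrop, ih s' (okStack_tail hs)]
        simp [stepB, hp]
      · rw [if_neg hp]
        have hb : isPairP t u = false := by simpa using hp
        have h2 : s'.reverse ++ t :: u :: r = (u :: t :: s').reverse ++ r := by simp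
        have h3 : s'.length + 1 = (u :: t :: s').length - 1 := by simp
        rw [h2, h3, ih (u :: t :: s') ⟨hb, hs⟩]
        simp [stepB, hb]

-- ===== VERDICT (by name: the statement is the Claim_ definition above) =====
theorem react_spec : Claim_equal_react := by
  intro data _
  unfold Spec_react react react_alt
  have := loop_eq_fold data [] trivial
  simp only [List.reverse_nil, List.nil_append, List.length_nil] at this
  rw [this]
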